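-- pv_equiv track=rewrite | github.com/matrix-mayank/item-generator | app.py | message_for_display
-- ===== SOURCE A (Python) =====
-- def message_for_display(raw_message):
--     """Strip metadata, design notes, and any content after the item so chat shows only the item."""
--     if not raw_message or not raw_message.strip():
--         return raw_message
--     text = raw_message.strip()
--     # Remove everything from --- or METADATA onward (no design notes or metadata in chat)
--     for sep in ('\n---', '\nMETADATA:', '\n\nMETADATA:', '\nDesign note', '\nDesign Note', '\n*Note'):
--         idx = text.find(sep)
--         if idx != -1:
--             text = text[:idx].rstrip()
--     # Keep only from first "Passage:" so we drop any leading "Here's your item..." or design blurb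
--     for marker in ('Passage:', 'passage:'):
--         passage_start = text.find(marker)
--         if passage_start != -1:
--             text = text[passage_start:]
--             break
--     return text.strip()
-- ===== SOURCE B (Python) =====
-- SEPS = ('\n---', '\nMETADATA:', '\n\nMETADATA:', '\nDesign note', '\nDesign Note', '\n*Note')
--
--
-- def message_for_display(raw_message):
--     """Strip metadata, design notes, and any content after the item so chat shows only the item."""
--     if not raw_message or not raw_message.strip():
--         return raw_message
--     text = raw_message.strip()
--     # Gather every separator position in one pass over the stripped text, cut once at the earliest.
--     cuts = [i for i in (text.find(sep) for sep in SEPS) if i != -1]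
--     if cuts:
--         text = text[:min(cuts)].rstrip()
--     # Prefer 'Passage:'; fall back to 'passage:'.
--     p = text.find('Passage:')
--     if p == -1:
--         p = text.find('passage:')
--     if p != -1:
--         text = text[p:]
--     return text.strip()
-- ===== Notes on version B (the rewrite author's own statement) =====
-- stated objective: simpler
-- what changed: A repeatedly rescans and truncates the text in place once per separator and uses a break-loop for the passage markers; B gathers all separator find positions over the stripped text in one pass, slices once at their minimum, and replaces the break-loop by a two-step find fallback.
import Mathlib
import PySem

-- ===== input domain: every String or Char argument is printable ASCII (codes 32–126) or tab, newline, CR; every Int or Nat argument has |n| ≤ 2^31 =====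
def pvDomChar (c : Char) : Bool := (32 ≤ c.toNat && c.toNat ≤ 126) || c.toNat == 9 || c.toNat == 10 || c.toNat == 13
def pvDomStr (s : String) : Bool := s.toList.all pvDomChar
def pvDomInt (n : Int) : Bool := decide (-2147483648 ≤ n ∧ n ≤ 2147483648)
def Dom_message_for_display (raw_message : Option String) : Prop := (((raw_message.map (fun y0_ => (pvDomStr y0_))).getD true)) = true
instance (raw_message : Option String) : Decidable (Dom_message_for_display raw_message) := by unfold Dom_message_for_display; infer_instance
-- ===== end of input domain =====

-- B replaces A's repeated find-and-truncate-in-place loop by gathering all separator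
-- positions in one pass and slicing once at their minimum (objective: simpler decomposition).

-- the metadata separators, the shared module-level tuple of both programs
def pvSeps : List String := ["\n---", "\nMETADATA:", "\n\nMETADATA:", "\nDesign note", "\nDesign Note", "\n*Note"]

-- ===== PORT A =====
def message_for_display (raw_message : Option String) : Option String :=
  match raw_message with
  | none => none
  | some raw =>
    if raw = "" ∨ PySem.Str.strip raw = "" then some raw
    else
      -- for sep in (...): idx = text.find(sep); if idx != -1: text = text[:idx].rstrip()
      let text1 := pvSeps.foldl (fun t sep =>
        let idx := PySem.Str.find t sep
        if idx ≠ -1 then PySem.Str.rstrip (PySem.Str.slice t none (some idx)) else t)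
        (PySem.Str.strip raw)
      -- for marker in (...): if found: text = text[passage_start:]; break   (flag = broke out)
      let st := ["Passage:", "passage:"].foldl (fun st marker =>
        if st.2 then st
        else
          let ps := PySem.Str.find st.1 marker
          if ps ≠ -1 then (PySem.Str.slice st.1 (some ps) none, true) else st)
        (text1, false)
      some (PySem.Str.strip st.1)

-- ===== PORT B =====
def message_for_display_alt (raw_message : Option String) : Option String :=
  match raw_message with
  | none => none
  | some raw =>
    if raw = "" ∨ PySem.Str.strip raw = "" then some raw
    else
      let text0 := PySem.Str.strip raw
      -- cuts = [i for i in (text.find(sep) for sep in SEPS) if i != -1]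
      let cuts := (pvSeps.map (fun sep => PySem.Str.find text0 sep)).filter (fun i => i != -1)
      -- if cuts: text = text[:min(cuts)].rstrip()
      let text1 := match PySem.List.min? cuts (fun i => i) with
        | some m => PySem.Str.rstrip (PySem.Str.slice text0 none (some m))
        | none => text0
      -- p = text.find('Passage:');  if p == -1: p = text.find('passage:')
      let p1 := PySem.Str.find text1 "Passage:"
      let p := if p1 = -1 then PySem.Str.find text1 "passage:" else p1
      let text2 := if p ≠ -1 then PySem.Str.slice text1 (some p) none else text1
      some (PySem.Str.strip text2)

-- ===== PRECONDITION & SPEC =====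
def Spec_message_for_display (raw_message : Option String) (out : Option String) : Prop := out = message_for_display_alt raw_message
instance (raw_message : Option String) (out : Option String) : Decidable (Spec_message_for_display raw_message out) := by unfold Spec_message_for_display; infer_instance

-- ===== CLAIM (what is proved, stated in full; the proofs are below) =====
def Claim_equal_message_for_display : Prop := ∀ (raw_message : Option String), Dom_message_for_display raw_message → Spec_message_for_display raw_message (message_for_display raw_message)

-- ===== LEMMAS AND PROOFS =====

-- character access with a harmless default (only used at in-range indices)
def pvAt (l : List Char) (j : Nat) : Char := (l[j]?).getD 'x'

-- shape of a metadata separator the fold/min equivalence relies on: nonempty, starts with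
-- '\n', ends with a non-whitespace character, and any interior '\n' has only whitespace
-- before it ('\n\nMETADATA:' is the one separator with an interior '\n')
def SepOK (sep : List Char) : Prop :=
  sep ≠ [] ∧ pvAt sep 0 = '\n' ∧ PySem.Chars.isspace (pvAt sep (sep.length - 1)) = false ∧
  ∀ o < sep.length, pvAt sep o = '\n' → 0 < o → ∀ o' < o, PySem.Chars.isspace (pvAt sep o') = true

-- A's per-separator loop body, on lists of chars
def cutC (t sep : List Char) : List Char :=
  if PySem.Chars.find t sep ≠ -1 then
    PySem.Chars.rstrip (PySem.List.slice t none (some (PySem.Chars.find t sep)))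
  else t

-- the running minimum cut position that A's loop is sequentially computing
def newmC (t sep : List Char) (m : Nat) : Nat :=
  if PySem.Chars.find t sep = -1 then m else min m (PySem.Chars.find t sep).toNat

lemma rstrip_decomp (t : List Char) :
    ∃ u, t = PySem.Chars.rstrip t ++ u ∧ ∀ c ∈ u, PySem.Chars.isspace c = true := by
  refine ⟨(t.reverse.takeWhile PySem.Chars.isspace).reverse, ?_, ?_⟩
  · simp only [PySem.Chars.rstrip]
    conv_lhs => rw [← List.reverse_reverse t,
      ← List.takeWhile_append_dropWhile (p := PySem.Chars.isspace) (l := t.reverse)]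
    rw [List.reverse_append]
  · intro c hc; rw [List.mem_reverse] at hc; exact List.mem_takeWhile_imp hc

lemma rstrip_append_ws (t u : List Char) (hu : ∀ c ∈ u, PySem.Chars.isspace c = true) :
    PySem.Chars.rstrip (t ++ u) = PySem.Chars.rstrip t := by
  simp only [PySem.Chars.rstrip, List.reverse_append]
  rw [List.dropWhile_append]
  have h : List.dropWhile PySem.Chars.isspace u.reverse = [] :=
    List.dropWhile_eq_nil_iff.mpr (fun c hc => hu c (List.mem_reverse.mp hc))
  simp [h]

lemma dropWhile_idem (p : Char → Bool) (l : List Char) :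
    List.dropWhile p (List.dropWhile p l) = List.dropWhile p l := by
  induction l with
  | nil => rfl
  | cons a l ih => by_cases h : p a <;> simp [h, ih]

lemma rstrip_idem (t : List Char) : PySem.Chars.rstrip (PySem.Chars.rstrip t) = PySem.Chars.rstrip t := by
  simp only [PySem.Chars.rstrip, List.reverse_reverse]
  rw [dropWhile_idem]

lemma strip_rstrip (s : List Char) : PySem.Chars.rstrip (PySem.Chars.strip s) = PySem.Chars.strip s := by
  simp only [PySem.Chars.strip]; exact rstrip_idem _


lemma rstrip_take_eq_take (t : List Char) (m : Nat) (hm : m ≤ t.length) :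
    PySem.Chars.rstrip (t.take m) = t.take (PySem.Chars.rstrip (t.take m)).length ∧
    (PySem.Chars.rstrip (t.take m)).length ≤ m := by
  obtain ⟨u, hu, -⟩ := rstrip_decomp (t.take m)
  have hlen : (PySem.Chars.rstrip (t.take m)).length ≤ m := by
    have := congrArg List.length hu; simp at this; omega
  refine ⟨?_, hlen⟩
  calc PySem.Chars.rstrip (t.take m)
      = (PySem.Chars.rstrip (t.take m) ++ u).take (PySem.Chars.rstrip (t.take m)).length :=
        List.take_left.symm
    _ = (t.take m).take (PySem.Chars.rstrip (t.take m)).length := by rw [← hu]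
    _ = t.take (min (PySem.Chars.rstrip (t.take m)).length m) := by rw [List.take_take]
    _ = t.take (PySem.Chars.rstrip (t.take m)).length := by rw [Nat.min_eq_left hlen]

lemma ws_between (t : List Char) (m j : Nat) (hm : m ≤ t.length)
    (hj1 : (PySem.Chars.rstrip (t.take m)).length ≤ j) (hj2 : j < m) :
    PySem.Chars.isspace (pvAt t j) = true := by
  obtain ⟨u, hu, hws⟩ := rstrip_decomp (t.take m)
  set r := PySem.Chars.rstrip (t.take m) with hr
  have hlu : r.length + u.length = m := by
    have := congrArg List.length hu; simp at this; omega
  have h1 : t[j]? = (t.take m)[j]? := by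
    rw [List.getElem?_take_of_lt hj2]
  have h2 : (t.take m)[j]? = u[j - r.length]? := by
    rw [hu, List.getElem?_append_right hj1]
  have hjlt : j - r.length < u.length := by omega
  have h3 : u[j - r.length]? = some u[j - r.length] :=
    List.getElem?_eq_getElem hjlt
  have h4 : pvAt t j = u[j - r.length] := by
    simp [pvAt, h1, h2, h3]
  rw [h4]
  exact hws _ (List.getElem_mem hjlt)

lemma rstrip_take_congr (t : List Char) (a b : Nat) (hab : a ≤ b) (hb : b ≤ t.length)
    (h : ∀ j, a ≤ j → j < b → PySem.Chars.isspace (pvAt t j) = true) :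
    PySem.Chars.rstrip (t.take a) = PySem.Chars.rstrip (t.take b) := by
  have hsplit : t.take b = t.take a ++ (t.take b).drop a := by
    conv_lhs => rw [← List.take_append_drop a (t.take b)]
    rw [List.take_take, Nat.min_eq_left hab]
  rw [hsplit, rstrip_append_ws]
  intro c hc
  obtain ⟨k, hk, hck⟩ := List.mem_iff_getElem.mp hc
  have hkb : a + k < b := by
    have := hk; simp [List.length_drop, List.length_take] at this; omega
  have hgc : c = pvAt t (a + k) := by
    rw [← hck, pvAt]
    have e1 : ((t.take b).drop a)[k] = (t.take b)[a + k]'(by simp; omega) := by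
      rw [List.getElem_drop]
    have e2 : (t.take b)[a + k]'(by simp; omega) = t[a + k]'(by omega) := List.getElem_take
    rw [e1, e2, List.getElem?_eq_getElem (by omega : a + k < t.length)]
    rfl
  rw [hgc]
  exact h _ (by omega) hkb

lemma infix_iff_drop (sub s : List Char) : (∃ j, sub <+: s.drop j) ↔ sub <:+: s :=
  (PySem.Chars.exists_prefix_drop_iff_isIn sub s).trans (PySem.Chars.isIn_iff_infix sub s)

lemma find_eq_of (t sep : List Char) (j : Nat) (hocc : sep <+: t.drop j)
    (hmin : ∀ i < j, ¬ sep <+: t.drop i) : PySem.Chars.find t sep = (j : Int) := by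
  have hinf : sep <:+: t := (infix_iff_drop sep t).mp ⟨j, hocc⟩
  have hne : PySem.Chars.find t sep ≠ -1 := by
    rw [Ne, PySem.Chars.find_eq_neg_one_iff]; exact fun h => h hinf
  have h0 : 0 ≤ PySem.Chars.find t sep := by
    have := PySem.Chars.neg_one_le_find t sep; omega
  obtain ⟨ho, hmn⟩ := PySem.Chars.find_spec h0
  rcases Nat.lt_trichotomy (PySem.Chars.find t sep).toNat j with h | h | h
  · exact absurd ho (hmin _ h)
  · omega
  · exact absurd hocc (hmn _ h)

lemma find_neg_of (t sep : List Char) (h : ∀ i, ¬ sep <+: t.drop i) :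
    PySem.Chars.find t sep = -1 := by
  rw [PySem.Chars.find_eq_neg_one_iff]
  intro hinf
  obtain ⟨j, hj⟩ := (infix_iff_drop sep t).mpr hinf
  exact h j hj

lemma prefix_take_drop (sep t : List Char) (L j : Nat) (hsep : sep ≠ []) :
    sep <+: (t.take L).drop j ↔ sep <+: t.drop j ∧ j + sep.length ≤ L := by
  rw [List.drop_take, List.prefix_take_iff]
  have hs : 0 < sep.length := List.length_pos_of_ne_nil hsep
  constructor <;> rintro ⟨h1, h2⟩ <;> exact ⟨h1, by omega⟩

lemma at_of_prefix_drop (t sep : List Char) (f o : Nat) (h : sep <+: t.drop f)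
    (ho : o < sep.length) : pvAt t (f + o) = pvAt sep o ∧ f + o < t.length := by
  obtain ⟨r, hr⟩ := h
  have hlen : sep.length + r.length = t.length - f := by
    have := congrArg List.length hr; simp at this; omega
  have hfo : f + o < t.length := by omega
  refine ⟨?_, hfo⟩
  have h1 : t[f + o]? = (t.drop f)[o]? := by rw [List.getElem?_drop]
  rw [pvAt, pvAt, h1, ← hr, List.getElem?_append_left ho]

lemma step_lemma (t sep : List Char) (m : Nat) (hm : m ≤ t.length)
    (hinv : m = t.length ∨ (m < t.length ∧ pvAt t m = '\n')) (hsep : SepOK sep) :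
    cutC (PySem.Chars.rstrip (t.take m)) sep = PySem.Chars.rstrip (t.take (newmC t sep m)) ∧
    newmC t sep m ≤ m ∧
    (newmC t sep m = t.length ∨ (newmC t sep m < t.length ∧ pvAt t (newmC t sep m) = '\n')) := by
  obtain ⟨hne, hhead, hlastc, hint⟩ := hsep
  have hs : 0 < sep.length := List.length_pos_of_ne_nil hne
  obtain ⟨hL, hLm⟩ := rstrip_take_eq_take t m hm
  set r := PySem.Chars.rstrip (t.take m) with hr
  set L := r.length with hLdef
  by_cases hf : PySem.Chars.find t sep = -1
  · have hnocc : ∀ i, ¬ sep <+: t.drop i := by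
      intro i hi
      exact (PySem.Chars.find_eq_neg_one_iff t sep).mp hf ((infix_iff_drop sep t).mp ⟨i, hi⟩)
    have hfs : PySem.Chars.find r sep = -1 := by
      apply find_neg_of
      intro i hi
      rw [hL] at hi
      exact hnocc i ((prefix_take_drop sep t L i hne).mp hi).1
    have hnm : newmC t sep m = m := by simp [newmC, hf]
    have hc : cutC r sep = r := by simp [cutC, hfs]
    rw [hnm]
    exact ⟨by rw [hc], le_refl m, hinv⟩
  · have h0f : 0 ≤ PySem.Chars.find t sep := by
      have := PySem.Chars.neg_one_le_find t sep; omega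
    set fN := (PySem.Chars.find t sep).toNat with hfN
    obtain ⟨hocc, hfirst⟩ := PySem.Chars.find_spec h0f
    rw [← hfN] at hocc hfirst
    have hfNlen : fN + sep.length ≤ t.length := by
      obtain ⟨rr, hrr⟩ := hocc
      have := congrArg List.length hrr; simp at this; omega
    have hatf : pvAt t fN = '\n' := by
      have h := (at_of_prefix_drop t sep fN 0 hocc hs).1
      simpa [hhead] using h
    have hnewm : newmC t sep m = min m fN := by
      simp [newmC, hf, ← hfN]
    by_cases hin : fN + sep.length ≤ L
    · -- full occurrence inside the current state: find r sep = fN, cut there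
      have hfr : PySem.Chars.find r sep = (fN : Int) := by
        apply find_eq_of
        · rw [hL]; exact (prefix_take_drop sep t L fN hne).mpr ⟨hocc, hin⟩
        · intro i hi hocci
          rw [hL] at hocci
          exact hfirst i hi ((prefix_take_drop sep t L i hne).mp hocci).1
      have hfrne : PySem.Chars.find r sep ≠ -1 := by rw [hfr]; omega
      have hcut : cutC r sep = PySem.Chars.rstrip (t.take fN) := by
        simp only [cutC, hfr]
        rw [if_pos (show ((fN : Nat) : Int) ≠ -1 by omega)]
        rw [hL, PySem.List.slice_to _ (by omega : (0:Int) ≤ ((fN : Nat) : Int))]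
        simp only [Int.toNat_natCast]
        rw [List.take_take, Nat.min_eq_left (show fN ≤ L by omega)]
      have hmin : min m fN = fN := by omega
      refine ⟨by rw [hcut, hnewm, hmin], by omega, ?_⟩
      rw [hnewm, hmin]
      exact Or.inr ⟨by omega, hatf⟩
    · -- no full occurrence inside the state
      have hfrneg : PySem.Chars.find r sep = -1 := by
        apply find_neg_of
        intro i hi
        rw [hL] at hi
        obtain ⟨ht', hi'⟩ := (prefix_take_drop sep t L i hne).mp hi
        have : fN ≤ i := by
          by_contra hlt
          exact hfirst i (by omega) ht'
        omega
      have hcutr : cutC r sep = r := by simp [cutC, hfrneg]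
      by_cases hmf : fN < m
      · have hmin : min m fN = fN := by omega
        -- the occurrence straddles the cut: everything in [fN, m) is whitespace
        have hq : m ≤ fN + sep.length - 1 := by
          by_contra hq'
          have hws := ws_between t m (fN + sep.length - 1) hm (by rw [← hr]; omega) (by omega)
          have hat := (at_of_prefix_drop t sep fN (sep.length - 1) hocc (by omega)).1
          rw [show fN + (sep.length - 1) = fN + sep.length - 1 by omega] at hat
          rw [hat, hlastc] at hws
          exact absurd hws (by simp)
        have hmlen : m < t.length := by omega
        have hminv : pvAt t m = '\n' := by
          rcases hinv with h | h
          · omega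
          · exact h.2
        have hoff : m - fN < sep.length := by omega
        have hatm := (at_of_prefix_drop t sep fN (m - fN) hocc hoff).1
        rw [show fN + (m - fN) = m by omega] at hatm
        have hsepnl : pvAt sep (m - fN) = '\n' := by rw [← hatm]; exact hminv
        have hintws := hint (m - fN) hoff hsepnl (by omega)
        have hws : ∀ j, fN ≤ j → j < m → PySem.Chars.isspace (pvAt t j) = true := by
          intro j hj1 hj2
          by_cases hjL : j < L
          · have hat2 := (at_of_prefix_drop t sep fN (j - fN) hocc (by omega)).1
            rw [show fN + (j - fN) = j by omega] at hat2
            rw [hat2]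
            exact hintws (j - fN) (by omega)
          · exact ws_between t m j hm (by rw [← hr]; omega) hj2
        have heq := rstrip_take_congr t fN m (by omega) hm hws
        refine ⟨by rw [hcutr, hnewm, hmin, hr, ← heq], by omega, ?_⟩
        rw [hnewm, hmin]
        exact Or.inr ⟨by omega, hatf⟩
      · have hmin : min m fN = m := by omega
        exact ⟨by rw [hcutr, hnewm, hmin], by omega, by rw [hnewm, hmin]; exact hinv⟩

lemma fold_lemma (t : List Char) (seps : List (List Char)) :
    ∀ m, (∀ sep ∈ seps, SepOK sep) → m ≤ t.length →
    (m = t.length ∨ (m < t.length ∧ pvAt t m = '\n')) →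
    seps.foldl cutC (PySem.Chars.rstrip (t.take m)) =
      PySem.Chars.rstrip (t.take (seps.foldl (fun m sep => newmC t sep m) m)) := by
  induction seps with
  | nil => intro m _ _ _; simp
  | cons sep rest ih =>
    intro m hseps hm hinv
    obtain ⟨h1, h2, h3⟩ := step_lemma t sep m hm hinv (hseps sep (by simp))
    simp only [List.foldl_cons]
    rw [h1]
    exact ih (newmC t sep m) (fun s hs => hseps s (by simp [hs])) (by omega) h3

lemma min_fold (L0 : Nat) (l : List Int) (hl : ∀ i ∈ l, -1 ≤ i ∧ i ≤ (L0 : Int)) :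
    l.foldl (fun m i => if i = -1 then m else min m i.toNat) L0 =
    (match PySem.List.min? (l.filter (fun i => i != -1)) (fun i => i) with
     | none => L0
     | some v => v.toNat) := by
  have hstep : (fun (m : Nat) (i : Int) => if i = -1 then m else min m i.toNat) =
      (fun m i => if (i != -1) = true then min m i.toNat else m) := by
    funext m i; by_cases h : i = -1 <;> simp [h]
  rw [hstep, PySem.List.foldl_if_eq_foldl_filter]
  have hmem : ∀ i ∈ l.filter (fun i => i != -1), 0 ≤ i ∧ i ≤ (L0 : Int) := by
    intro i hi
    have h1 := hl i (List.mem_of_mem_filter hi)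
    have h2 := (List.mem_filter.mp hi).2
    simp at h2
    omega
  have aux : ∀ (l2 : List Int) (a : Int), 0 ≤ a → (∀ i ∈ l2, 0 ≤ i) →
      l2.foldl (fun m i => min m i.toNat) a.toNat = (l2.foldl min a).toNat := by
    intro l2
    induction l2 with
    | nil => intro a _ _; rfl
    | cons x xs ih2 =>
      intro a ha hall
      simp only [List.foldl_cons]
      rw [show min a.toNat x.toNat = (min a x).toNat by omega]
      exact ih2 _ (by have := hall x (by simp); omega) (fun i hi => hall i (by simp [hi]))
  cases hfil : l.filter (fun i => i != -1) with
  | nil => simp [PySem.List.min?]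
  | cons c rest =>
    rw [hfil] at hmem
    rw [PySem.List.min?_id_cons]
    have hc := hmem c (by simp)
    simp only [List.foldl_cons]
    rw [show min L0 c.toNat = c.toNat by omega]
    exact aux rest c (by omega) (fun i hi => (hmem i (by simp [hi])).1)

lemma fold_hom (seps : List String) (u : String) :
    (seps.foldl (fun t sep =>
        let idx := PySem.Str.find t sep
        if idx ≠ -1 then PySem.Str.rstrip (PySem.Str.slice t none (some idx)) else t) u).toList =
    (seps.map String.toList).foldl cutC u.toList := by
  induction seps generalizing u with
  | nil => simp
  | cons sep rest ih =>
    simp only [List.foldl_cons, List.map_cons]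
    rw [ih]
    congr 1
    show (if PySem.Str.find u sep ≠ -1 then
        PySem.Str.rstrip (PySem.Str.slice u none (some (PySem.Str.find u sep))) else u).toList =
      cutC u.toList sep.toList
    by_cases h : PySem.Str.find u sep = -1
    · have h' : PySem.Chars.find u.toList sep.toList = -1 := by rw [← PySem.Str.find_eq]; exact h
      simp [cutC, h']
    · have h' : PySem.Chars.find u.toList sep.toList ≠ -1 := by rw [← PySem.Str.find_eq]; exact h
      simp [cutC, h', PySem.Str.toList_rstrip, PySem.Str.toList_slice,
        PySem.Chars.slice_eq_listSlice, PySem.Str.find_eq]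

lemma passage_eq (u : String) :
    ((["Passage:", "passage:"].foldl (fun st marker =>
        if st.2 then st
        else
          let ps := PySem.Str.find st.1 marker
          if ps ≠ -1 then (PySem.Str.slice st.1 (some ps) none, true) else st)
        (u, false)).1) =
    (let p1 := PySem.Str.find u "Passage:"
     let p := if p1 = -1 then PySem.Str.find u "passage:" else p1
     if p ≠ -1 then PySem.Str.slice u (some p) none else u) := by
  by_cases h1 : PySem.Str.find u "Passage:" = -1 <;>
    by_cases h2 : PySem.Str.find u "passage:" = -1 <;>
      · simp at h1 h2
        simp [h1, h2]

-- main equality for a nonempty, non-whitespace message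
lemma main_eq (raw : String) (hb : ¬ (raw = "" ∨ PySem.Str.strip raw = "")) :
    message_for_display (some raw) = message_for_display_alt (some raw) := by
  unfold message_for_display message_for_display_alt
  simp only [if_neg hb]
  set text0 := PySem.Str.strip raw with htext0
  set t := text0.toList with ht0
  have ht : PySem.Chars.rstrip t = t := by
    rw [ht0, htext0, PySem.Str.toList_strip]; exact strip_rstrip _
  set lseps := pvSeps.map String.toList with hlseps
  have hsepsok : ∀ sep ∈ lseps, SepOK sep := by
    rw [hlseps]
    intro sep hsep
    unfold SepOK
    fin_cases hsep <;> decide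
  set M := lseps.foldl (fun m sep => newmC t sep m) t.length with hM
  set finds := lseps.map (fun sep => PySem.Chars.find t sep) with hfinds
  -- A's metadata loop computes rstrip (t.take M)
  have hA : (pvSeps.foldl (fun t sep =>
      let idx := PySem.Str.find t sep
      if idx ≠ -1 then PySem.Str.rstrip (PySem.Str.slice t none (some idx)) else t) text0).toList
      = PySem.Chars.rstrip (t.take M) := by
    rw [fold_hom]
    have h := fold_lemma t lseps t.length hsepsok (le_refl _) (Or.inl rfl)
    rw [List.take_length, ht] at h
    exact h
  -- M is the min over the valid find results
  have hbounds : ∀ i ∈ finds, -1 ≤ i ∧ i ≤ (t.length : Int) := by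
    intro i hi
    obtain ⟨sep, -, rfl⟩ := List.mem_map.mp hi
    exact ⟨PySem.Chars.neg_one_le_find t sep, PySem.Chars.find_le_length t sep⟩
  have hMf : M = finds.foldl (fun m i => if i = -1 then m else min m i.toNat) t.length := by
    rw [hM, hfinds, List.foldl_map]
    rfl
  have hMv := min_fold t.length finds hbounds
  -- B's cut list is the filtered find list
  have hcuts : (pvSeps.map (fun sep => PySem.Str.find text0 sep)).filter (fun i => i != -1)
      = finds.filter (fun i => i != -1) := by
    rw [hfinds, hlseps, List.map_map]
    rfl
  rw [hcuts]
  -- the two text1 values agree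
  have htext1 : (pvSeps.foldl (fun t sep =>
      let idx := PySem.Str.find t sep
      if idx ≠ -1 then PySem.Str.rstrip (PySem.Str.slice t none (some idx)) else t) text0)
      = (match PySem.List.min? (finds.filter (fun i => i != -1)) (fun i => i) with
         | some m => PySem.Str.rstrip (PySem.Str.slice text0 none (some m))
         | none => text0) := by
    apply String.toList_inj.mp
    rw [hA]
    cases hmn : PySem.List.min? (finds.filter (fun i => i != -1)) (fun i => i) with
    | none =>
      have hMt : M = t.length := by rw [hMf, hMv, hmn]
      rw [hMt, List.take_length, ht]
    | some v =>
      have hv0 : 0 ≤ v := by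
        have hvmem := PySem.List.min?_mem hmn
        have h1 := (List.mem_filter.mp hvmem).2
        have h2 := hbounds v (List.mem_of_mem_filter hvmem)
        simp at h1
        omega
      have hMt : M = v.toNat := by rw [hMf, hMv, hmn]
      rw [hMt]
      rw [PySem.Str.toList_rstrip, PySem.Str.toList_slice, PySem.Chars.slice_eq_listSlice,
        PySem.List.slice_to _ hv0]
  rw [htext1, passage_eq]

-- ===== VERDICT (by name: the statement is the Claim_ definition above) =====
theorem message_for_display_spec : Claim_equal_message_for_display := by
  unfold Claim_equal_message_for_display
  intro raw_message _
  unfold Spec_message_for_display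
  match raw_message with
  | none => rfl
  | some raw =>
    by_cases hb : raw = "" ∨ PySem.Str.strip raw = ""
    · unfold message_for_display message_for_display_alt
      simp only [if_pos hb]
    · exact main_eq raw hb
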